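-- pv_equiv track=rewrite | github.com/liammcdade/All-code-in-one | cphersolve.py | solve_jumble_with_plaintext
-- ===== SOURCE A (Python) =====
-- def solve_jumble_with_plaintext(jumbled, plaintext):
--     # Get letter positions for both
--     jumbled_chars = list(jumbled)
--     plain_chars = list(plaintext)
--     jumbled_letter_positions = [i for i, c in enumerate(jumbled_chars) if c.isalpha()]
--     plain_letter_positions = [i for i, c in enumerate(plain_chars) if c.isalpha()]
--     # Map jumbled letters to plain letters by position
--     mapping = {}
--     for j_pos, p_pos in zip(jumbled_letter_positions, plain_letter_positions):
--         mapping[j_pos] = plain_chars[p_pos]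
--     # Build solved text
--     solved = jumbled_chars[:]
--     for pos in mapping:
--         solved[pos] = mapping[pos]
--     return ''.join(solved)
-- ===== SOURCE B (Python) =====
-- def solve_jumble_with_plaintext(jumbled, plaintext):
--     plain_letters = [c for c in plaintext if c.isalpha()]
--     out = []
--     idx = 0
--     for c in jumbled:
--         if c.isalpha() and idx < len(plain_letters):
--             out.append(plain_letters[idx])
--             idx += 1
--         else:
--             out.append(c)
--     return ''.join(out)
-- ===== Notes on version B (the rewrite author's own statement) =====
-- stated objective: simpler
-- what changed: Replaces the two positional index lists, the position->letter mapping dict and the second rewrite pass by one filtered plaintext-letter list and a single scan over jumbled with a running counter.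
import Mathlib
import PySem

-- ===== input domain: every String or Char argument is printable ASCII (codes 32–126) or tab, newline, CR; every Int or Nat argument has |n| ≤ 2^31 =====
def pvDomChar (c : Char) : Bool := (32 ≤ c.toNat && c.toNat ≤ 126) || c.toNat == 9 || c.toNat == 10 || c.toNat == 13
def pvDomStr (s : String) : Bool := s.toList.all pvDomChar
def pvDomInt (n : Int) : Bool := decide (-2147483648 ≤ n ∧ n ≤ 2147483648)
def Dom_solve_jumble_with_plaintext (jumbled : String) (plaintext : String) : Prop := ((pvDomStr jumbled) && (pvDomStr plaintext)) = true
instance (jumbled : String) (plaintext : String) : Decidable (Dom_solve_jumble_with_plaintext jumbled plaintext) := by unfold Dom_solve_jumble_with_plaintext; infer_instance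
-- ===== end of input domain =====

-- B replaces A's index lists + mapping dict + rewrite pass by one scan with a running counter (simpler).
-- ===== PORT A =====
def solve_jumble_with_plaintext (jumbled : String) (plaintext : String) : String :=
  let jumbled_chars := jumbled.toList
  let plain_chars := plaintext.toList
  let jumbled_letter_positions :=
    ((PySem.List.enumerate jumbled_chars).filter (fun p => PySem.Chars.isalpha p.2)).map (fun p => p.1)
  let plain_letter_positions :=
    ((PySem.List.enumerate plain_chars).filter (fun p => PySem.Chars.isalpha p.2)).map (fun p => p.1)
  -- plain_chars[p_pos]: p_pos is always an in-range non-negative index here, so pyGetD is exact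
  let mapping := (List.zip jumbled_letter_positions plain_letter_positions).foldl
    (fun (d : PySem.Dict Int Char) jp => d.insert jp.1 (PySem.List.pyGetD plain_chars jp.2 ' ')) PySem.Dict.empty
  -- `for pos in mapping: solved[pos] = mapping[pos]`: pos is always a valid non-negative index
  -- of solved, so Python's list assignment is exactly `.set pos.toNat`
  let solved := mapping.items.foldl (fun acc (kv : Int × Char) => acc.set kv.1.toNat kv.2) jumbled_chars
  String.ofList solved

-- ===== PORT B =====
def solve_jumble_with_plaintext_alt (jumbled : String) (plaintext : String) : String :=
  let plain_letters := plaintext.toList.filter PySem.Chars.isalpha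
  let st := jumbled.toList.foldl
    (fun (st : List Char × Nat) c =>
      if PySem.Chars.isalpha c && decide (st.2 < plain_letters.length) then
        (st.1 ++ [plain_letters.getD st.2 ' '], st.2 + 1)
      else (st.1 ++ [c], st.2)) ([], 0)
  String.ofList st.1

-- ===== PRECONDITION & SPEC =====
def Spec_solve_jumble_with_plaintext (jumbled : String) (plaintext : String) (out : String) : Prop := out = solve_jumble_with_plaintext_alt jumbled plaintext
instance (jumbled : String) (plaintext : String) (out : String) : Decidable (Spec_solve_jumble_with_plaintext jumbled plaintext out) := by unfold Spec_solve_jumble_with_plaintext; infer_instance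

-- ===== CLAIM (what is proved, stated in full; the proofs are below) =====
def Claim_equal_solve_jumble_with_plaintext : Prop := ∀ (jumbled : String) (plaintext : String), Dom_solve_jumble_with_plaintext jumbled plaintext → Spec_solve_jumble_with_plaintext jumbled plaintext (solve_jumble_with_plaintext jumbled plaintext)

-- ===== LEMMAS AND PROOFS =====

-- the common scan both results reduce to: replace each letter of the first argument by the next
-- unconsumed letter of the second (keep it once the second runs out), keep non-letters
def pvScan : List Char → List Char → List Char
  | [], _ => []
  | c :: rest, pls =>
    if PySem.Chars.isalpha c then
      match pls with
      | p :: ptl => p :: pvScan rest ptl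
      | [] => c :: pvScan rest []
    else c :: pvScan rest pls

theorem pvScan_nil_right (jc : List Char) : pvScan jc [] = jc := by
  induction jc with
  | nil => rfl
  | cons c rest ih => simp [pvScan, ih]

-- A side --------------------------------------------------------------

-- looking the plain-letter positions back up in plain_chars yields exactly the plain letters
theorem pvA_values (pc : List Char) :
    (((PySem.List.enumerate pc).filter (fun p => PySem.Chars.isalpha p.2)).map (fun p => p.1)).map
        (fun i => PySem.List.pyGetD pc i ' ') = pc.filter PySem.Chars.isalpha := by
  rw [List.map_map]
  have h : ∀ p ∈ (PySem.List.enumerate pc).filter (fun p => PySem.Chars.isalpha p.2),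
      ((fun i => PySem.List.pyGetD pc i ' ') ∘ (fun p : Int × Char => p.1)) p = p.2 := by
    intro p hp
    have hp' := List.mem_of_mem_filter hp
    rw [PySem.List.mem_enumerate_iff] at hp'
    obtain ⟨k, hk, rfl⟩ := hp'
    simp [PySem.List.pyGetD_natCast, List.getD_eq_getElem?_getD, hk]
  rw [List.map_congr_left h]
  conv_rhs => rw [← PySem.List.map_snd_enumerate pc 0, List.filter_map]
  rfl

-- the jumbled letter positions are strictly increasing, hence distinct dict keys
theorem pvA_jpos_nodup (jc : List Char) :
    ((((PySem.List.enumerate jc).filter (fun p => PySem.Chars.isalpha p.2)).map (fun p => p.1))).Nodup := by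
  have := (PySem.List.pairwise_lt_enumerate jc 0).filter (fun p => PySem.Chars.isalpha p.2)
  exact (this.map _ (by intro a b h; exact h)).imp ne_of_lt

theorem pv_map_fst_zip {α β : Type} (l₁ : List α) (l₂ : List β) :
    (l₁.zip l₂).map Prod.fst = l₁.take l₂.length := by
  induction l₁ generalizing l₂ with
  | nil => simp
  | cons a l ih => cases l₂ with
    | nil => simp
    | cons b l' => simp [ih]

-- the mapping dict, iterated in insertion order, is the zip of positions with plain letters
theorem pvA_items (jc pc : List Char) :
    ((List.zip (((PySem.List.enumerate jc).filter (fun p => PySem.Chars.isalpha p.2)).map (fun p => p.1))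
               (((PySem.List.enumerate pc).filter (fun p => PySem.Chars.isalpha p.2)).map (fun p => p.1))).foldl
      (fun (d : PySem.Dict Int Char) jp => d.insert jp.1 (PySem.List.pyGetD pc jp.2 ' ')) PySem.Dict.empty).items
    = List.zip (((PySem.List.enumerate jc).filter (fun p => PySem.Chars.isalpha p.2)).map (fun p => p.1))
        ((((PySem.List.enumerate pc).filter (fun p => PySem.Chars.isalpha p.2)).map (fun p => p.1)).map
          (fun i => PySem.List.pyGetD pc i ' ')) := by
  rw [PySem.Dict.items_foldl_insert_fresh
        (List.zip (((PySem.List.enumerate jc).filter (fun p => PySem.Chars.isalpha p.2)).map (fun p => p.1))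
                  (((PySem.List.enumerate pc).filter (fun p => PySem.Chars.isalpha p.2)).map (fun p => p.1)))
        (fun jp => jp.1) (fun jp => PySem.List.pyGetD pc jp.2 ' ') PySem.Dict.empty
        (fun a _ => PySem.Dict.contains_empty _)
        (by
          rw [pv_map_fst_zip]
          exact (pvA_jpos_nodup jc).sublist (List.take_sublist ..))]
  conv_rhs => rw [List.zip_map_right]
  show PySem.Dict.empty.items ++ _ = _
  rfl

-- writing at positions that are all past the head leaves the head alone
theorem pv_fold_shift (L : List (Int × Char)) (s : Int)
    (h : ∀ kv ∈ L, s + 1 ≤ kv.1) (a : Char) (xs : List Char) :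
    L.foldl (fun acc kv => acc.set (kv.1 - s).toNat kv.2) (a :: xs)
      = a :: L.foldl (fun acc kv => acc.set (kv.1 - (s+1)).toNat kv.2) xs := by
  induction L generalizing xs with
  | nil => rfl
  | cons kv L ih =>
    have h1 := h kv (List.mem_cons_self ..)
    have hset : (a :: xs).set (kv.1 - s).toNat kv.2 = a :: xs.set (kv.1 - (s+1)).toNat kv.2 := by
      have hn : (kv.1 - s).toNat = (kv.1 - (s+1)).toNat + 1 := by omega
      rw [hn]; rfl
    simp only [List.foldl_cons, hset]
    exact ih (fun kv hm => h kv (List.mem_cons_of_mem _ hm)) _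

-- A's rewrite pass over (alpha position, plain letter) pairs IS the single scan
theorem pvA_fold_set_gen (jc : List Char) (pls : List Char) (s : Int) :
    (List.zip (((PySem.List.enumerate jc s).filter (fun p => PySem.Chars.isalpha p.2)).map (fun p => p.1)) pls).foldl
        (fun acc (kv : Int × Char) => acc.set (kv.1 - s).toNat kv.2) jc = pvScan jc pls := by
  induction jc generalizing pls s with
  | nil => simp [PySem.List.enumerate, pvScan]
  | cons c rest ih =>
    have hmem : ∀ (q : List Char), ∀ kv ∈ List.zip
        (((PySem.List.enumerate rest (s+1)).filter (fun p => PySem.Chars.isalpha p.2)).map (fun p => p.1)) q,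
        s + 1 ≤ kv.1 := by
      intro q kv hkv
      have h1 := (List.of_mem_zip hkv).1
      obtain ⟨p, hp, hpe⟩ := List.mem_map.mp h1
      have hp' := List.mem_of_mem_filter hp
      rw [PySem.List.mem_enumerate_iff] at hp'
      obtain ⟨k, hk, rfl⟩ := hp'
      simp at hpe; omega
    rw [PySem.List.enumerate_cons]
    by_cases halpha : PySem.Chars.isalpha c
    · cases pls with
      | nil =>
        simp [halpha, pvScan, pvScan_nil_right]
      | cons p ptl =>
        simp only [List.filter_cons, halpha, if_pos, List.map_cons, List.zip_cons_cons,
          List.foldl_cons, sub_self, Int.toNat_zero, List.set]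
        rw [pv_fold_shift _ s (hmem ptl) p rest]
        simp [pvScan, halpha, ih ptl (s+1)]
    · simp only [List.filter_cons, halpha, Bool.false_eq_true, ite_false]
      rw [pv_fold_shift _ s (hmem pls) c rest]
      simp [pvScan, halpha, ih pls (s+1)]

theorem pvA_fold_set (jc : List Char) (pls : List Char) :
    (List.zip (((PySem.List.enumerate jc).filter (fun p => PySem.Chars.isalpha p.2)).map (fun p => p.1)) pls).foldl
        (fun acc (kv : Int × Char) => acc.set kv.1.toNat kv.2) jc = pvScan jc pls := by
  have h := pvA_fold_set_gen jc pls 0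
  simpa using h

-- B side --------------------------------------------------------------

theorem pvB_fold (pls : List Char) (jc : List Char) (acc : List Char) (i : Nat) :
    (jc.foldl (fun (st : List Char × Nat) c =>
        if PySem.Chars.isalpha c && decide (st.2 < pls.length) then
          (st.1 ++ [pls.getD st.2 ' '], st.2 + 1)
        else (st.1 ++ [c], st.2)) (acc, i)).1 = acc ++ pvScan jc (pls.drop i) := by
  induction jc generalizing acc i with
  | nil => simp [pvScan]
  | cons c rest ih =>
    by_cases halpha : PySem.Chars.isalpha c
    · by_cases hlt : i < pls.length
      · have hdrop : pls.drop i = pls[i] :: pls.drop (i+1) := (List.getElem_cons_drop hlt).symm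
        simp only [List.foldl_cons, halpha, hlt, decide_true, Bool.and_self, ite_true, ih]
        rw [hdrop]
        simp [pvScan, halpha, List.getD_eq_getElem?_getD, hlt]
      · have hdrop : pls.drop i = [] := List.drop_eq_nil_of_le (by omega)
        simp only [List.foldl_cons, halpha, hlt, decide_false, Bool.and_false,
          Bool.false_eq_true, ite_false, ih]
        rw [hdrop]
        simp [pvScan, halpha]
    · simp only [List.foldl_cons, halpha, Bool.false_and, Bool.false_eq_true, ite_false, ih]
      simp [pvScan, halpha]

-- combining -----------------------------------------------------------

theorem pv_ports_eq (jumbled plaintext : String) :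
    solve_jumble_with_plaintext jumbled plaintext = solve_jumble_with_plaintext_alt jumbled plaintext := by
  simp only [solve_jumble_with_plaintext, solve_jumble_with_plaintext_alt]
  rw [pvA_items, pvA_values, pvA_fold_set, pvB_fold]
  simp

-- ===== VERDICT (by name: the statement is the Claim_ definition above) =====
theorem solve_jumble_with_plaintext_spec : Claim_equal_solve_jumble_with_plaintext := by
  intro jumbled plaintext _
  unfold Spec_solve_jumble_with_plaintext
  exact pv_ports_eq jumbled plaintext
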